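-- pv_equiv track=rewrite | github.com/DaveMcEwan/dmppl | dmppl/experiments/eva/eva_common.py | dsfDeltas
-- ===== SOURCE A (Python) =====
-- def dsfDeltas(winSize, reqNDeltasBk, reqNDeltasFw, reqZoomFactor): # {{{
--     '''Return a list of downsample factors and deltas (timeshifts).
--
--     [ (<downsample factor>, <delta>), ... ]
--
--     The downsample factor may of course be ignored, but provides a method of
--     "zooming out" from a plot when there are many deltas to calculate.
--     This does not choose a method of performing the downsampling.
--     reqZoomFactor < 2 ==> zoomFactor = max(nDeltasBk, nDeltasFw)
--     '''
--     assert isinstance(winSize, int), type(winSize)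
--     assert 1 <= winSize, winSize
--     assert isinstance(reqNDeltasBk, int), type(reqNDeltasBk)
--     assert 0 <= reqNDeltasBk, reqNDeltasBk # Non-negative
--     assert isinstance(reqNDeltasFw, int), type(reqNDeltasFw)
--     assert 1 <= reqNDeltasFw, reqNDeltasFw # Positive
--     assert isinstance(reqZoomFactor, int), type(reqZoomFactor)
--     assert 0 <= reqZoomFactor, reqZoomFactor
--
--     nDeltasBk = min(reqNDeltasBk, winSize // 2)
--     nDeltasFw = min(reqNDeltasFw, winSize // 2)
--     zoomFactor = reqZoomFactor if 1 < reqZoomFactor \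
--                                else max(nDeltasBk, nDeltasFw)
--
--     # All feasible downsample factors with associated upper absdeltas.
--     # 64 scaling factors is always more than enough in practice.
--     # Just 32 should really be enough; 1 in 4 billion samples.
--     # NOTE: 0th element is a dummy for most of these calculations which is
--     # discarded.
--     log2_dsf = range(64+2) # +2 <- discard 0th, range last element +1.
--
--     # Upper delta for each downsample factor, plus 1.
--     _d_hi = [sum([zoomFactor * 2**f for f in range(l2f)]) for l2f in log2_dsf]
--     _d_hi_bk = [hi for hi in _d_hi if hi < nDeltasBk]
--     _d_hi_fw = [hi for hi in _d_hi if hi < nDeltasFw]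
--     d_hi_bk = _d_hi_bk + [ min(nDeltasBk, _d_hi[len(_d_hi_bk)]) ]
--     d_hi_fw = _d_hi_fw + [ min(nDeltasFw, _d_hi[len(_d_hi_fw)]) ]
--
--     # Actual downsample factors used.
--     n_dsf_bk = len(d_hi_bk)
--     dsf_bk = [2**(l2f - 1) for l2f in log2_dsf[:n_dsf_bk]]
--     n_dsf_fw = len(d_hi_fw)
--     dsf_fw = [2**(l2f - 1) for l2f in log2_dsf[:n_dsf_fw]]
--
--     # Lower delta for each downsample factor.
--     d_lo_bk = [d_hi_bk[i-1] for i in range(n_dsf_bk)]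
--     assert 0 < n_dsf_bk == len(dsf_bk) == len(d_hi_bk) == len(d_lo_bk)
--     d_lo_fw = [d_hi_fw[i-1] for i in range(n_dsf_fw)]
--     assert 0 < n_dsf_fw == len(dsf_fw) == len(d_hi_fw) == len(d_lo_fw)
--
--     # Actual deltas in list with format (<downsample factor>, <real delta>)
--     pos_d = [(dsf_fw[i], d) \
--              for i in range(1, n_dsf_fw) \
--              for d in range(d_lo_fw[i], d_hi_fw[i], dsf_fw[i])]
--     neg_d = [(dsf_bk[i], d) \
--              for i in range(1, n_dsf_bk) \
--              for d in range(-d_hi_bk[i], -d_lo_bk[i], dsf_bk[i])]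
--     ret = sorted(neg_d + pos_d)
--
--     assert ret[0][0] == 1 # Unscaled deltas first.
--
--     #nDeltas = len(ret)
--     #delta0Idx = ret.index((1,0))
--     if 0 == reqZoomFactor:
--         assert nDeltasBk == len([d for dsf,d in ret if d < 0])
--         assert nDeltasFw == len([d for dsf,d in ret if 0 <= d])
--
--     return ret
-- ===== SOURCE B (Python) =====
-- def dsfDeltas(winSize, reqNDeltasBk, reqNDeltasFw, reqZoomFactor):
--     """Return a sorted list of (downsample factor, delta) pairs.
--
--     Instead of generating the backward and forward delta lists and re-sorting
--     their concatenation, walk the geometric zoom levels once, building the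
--     (already sorted) negative and positive lists directly, then merge the two
--     sorted lists linearly.
--     """
--     assert isinstance(winSize, int), type(winSize)
--     assert 1 <= winSize, winSize
--     assert isinstance(reqNDeltasBk, int), type(reqNDeltasBk)
--     assert 0 <= reqNDeltasBk, reqNDeltasBk # Non-negative
--     assert isinstance(reqNDeltasFw, int), type(reqNDeltasFw)
--     assert 1 <= reqNDeltasFw, reqNDeltasFw # Positive
--     assert isinstance(reqZoomFactor, int), type(reqZoomFactor)
--     assert 0 <= reqZoomFactor, reqZoomFactor
--
--     nDeltasBk = min(reqNDeltasBk, winSize // 2)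
--     nDeltasFw = min(reqNDeltasFw, winSize // 2)
--     zoomFactor = reqZoomFactor if 1 < reqZoomFactor \
--                                else max(nDeltasBk, nDeltasFw)
--
--     neg, pos = [], []
--     lo, dsf = 0, 1
--     while lo < nDeltasBk or lo < nDeltasFw:
--         hi = lo + zoomFactor * dsf
--         if lo < nDeltasBk:
--             neg.extend((dsf, d) for d in range(-min(nDeltasBk, hi), -lo, dsf))
--         if lo < nDeltasFw:
--             pos.extend((dsf, d) for d in range(lo, min(nDeltasFw, hi), dsf))
--         lo, dsf = hi, 2 * dsf
--
--     # Linear merge of the two sorted lists.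
--     ret = []
--     i = j = 0
--     while i < len(neg) and j < len(pos):
--         if neg[i] < pos[j]:
--             ret.append(neg[i]); i += 1
--         else:
--             ret.append(pos[j]); j += 1
--     ret.extend(neg[i:])
--     ret.extend(pos[j:])
--     return ret
-- ===== Notes on version B (the rewrite author's own statement) =====
-- stated objective: alternative
-- what changed: B walks the geometric zoom levels once, emitting the backward and forward delta lists already sorted, and merges the two sorted lists linearly, instead of building the downsample-factor tables from a 66-entry prefix-sum list and re-sorting the concatenated delta lists.
import Mathlib
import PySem

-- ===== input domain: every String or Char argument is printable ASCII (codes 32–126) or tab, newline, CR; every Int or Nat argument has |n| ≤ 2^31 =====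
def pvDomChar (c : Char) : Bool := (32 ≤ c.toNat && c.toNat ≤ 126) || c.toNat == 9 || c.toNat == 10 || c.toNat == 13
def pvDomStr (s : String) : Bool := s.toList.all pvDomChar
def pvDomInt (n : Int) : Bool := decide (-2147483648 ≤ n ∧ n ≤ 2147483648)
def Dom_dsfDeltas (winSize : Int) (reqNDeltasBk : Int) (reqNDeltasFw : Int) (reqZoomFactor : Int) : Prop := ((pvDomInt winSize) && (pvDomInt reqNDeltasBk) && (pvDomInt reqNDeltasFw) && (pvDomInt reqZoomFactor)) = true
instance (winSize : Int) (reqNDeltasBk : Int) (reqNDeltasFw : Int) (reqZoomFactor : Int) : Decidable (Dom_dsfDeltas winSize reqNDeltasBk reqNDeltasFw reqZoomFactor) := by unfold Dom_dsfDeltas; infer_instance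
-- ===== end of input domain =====

-- B replaces A's generate-then-resort with a single walk over the zoom levels that emits the
-- backward and forward delta lists already sorted and merges them linearly (return value only;
-- neither version mutates its arguments).

-- ===== PORT A =====
-- A computes the d_hi/dsf/d_lo tables and the delta comprehension twice, once for the bk side
-- and once for the fw side, with identical code; the port factors that duplicated block into
-- the helper `aSide` (parameter `neg` selects the bk-side negated range), step for step.
-- `aDHi` is A's `_d_hi` table: cumulative sums of zoomFactor * 2**f.
def aDHi (zf : Int) : List Int :=
  (PySem.List.pyRange 0 66 1).map (fun l2f =>
    ((PySem.List.pyRange 0 l2f 1).map (fun f => zf * 2 ^ f.toNat)).sum)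

-- One side of A's computation (`_d_hi_bk`/`d_hi_bk`/`dsf_bk`/`d_lo_bk`/`neg_d` for neg := true,
-- the `_fw`/`pos_d` twins for neg := false).
-- Python's `_d_hi[len(_d_hi_bk)]` is ported with pyGetD default 0: inside Dom the index is
-- always in range (proved below via mIdx_le), so the default is never read.
-- Python's `dsf` table has the float 2**(-1) = 0.5 as its dummy 0th element and `d_lo`'s dummy
-- 0th element is the wrapped-around d_hi[-1]; both dummies are never read (the comprehension
-- starts at i = 1), and the port keeps them as the unread Int values 2^0 resp. pyGetD's wrap.
def aSide (zf n : Int) (neg : Bool) : List (Int × Int) :=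
  let dHiAll := aDHi zf
  let dHiF := dHiAll.filter (fun hi => decide (hi < n))
  let dHi := dHiF ++ [min n (PySem.List.pyGetD dHiAll (dHiF.length : Int) 0)]
  let nDsf : Int := (dHi.length : Int)
  let dsf := ((PySem.List.pyRange 0 66 1).take dHi.length).map (fun l2f => 2 ^ (l2f - 1).toNat)
  let dLo := (PySem.List.pyRange 0 nDsf 1).map (fun i => PySem.List.pyGetD dHi (i - 1) 0)
  (PySem.List.pyRange 1 nDsf 1).flatMap (fun i =>
    let s := PySem.List.pyGetD dsf i 1
    let lo := PySem.List.pyGetD dLo i 0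
    let hi := PySem.List.pyGetD dHi i 0
    (if neg then PySem.List.pyRange (-hi) (-lo) s else PySem.List.pyRange lo hi s).map
      (fun d => (s, d)))

def dsfDeltas (winSize : Int) (reqNDeltasBk : Int) (reqNDeltasFw : Int) (reqZoomFactor : Int) : List (Int × Int) :=
  let nDeltasBk := min reqNDeltasBk (PySem.Int.floordiv winSize 2)
  let nDeltasFw := min reqNDeltasFw (PySem.Int.floordiv winSize 2)
  let zoomFactor := if 1 < reqZoomFactor then reqZoomFactor else max nDeltasBk nDeltasFw
  PySem.List.sorted2 (aSide zoomFactor nDeltasBk true ++ aSide zoomFactor nDeltasFw false)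
    (fun p => p.1) (fun p => p.2)

-- ===== PORT B =====
-- Python's tuple comparison neg[i] < pos[j].
def lexLtB (p q : Int × Int) : Bool :=
  decide (p.1 < q.1) || (decide (p.1 = q.1) && decide (p.2 < q.2))

-- The two-pointer merge loop of Source B; the indices i, j become the list suffixes.
def bMerge : List (Int × Int) → List (Int × Int) → List (Int × Int)
  | [], qs => qs
  | p :: ps, [] => p :: ps
  | p :: ps, q :: qs =>
    if lexLtB p q then p :: bMerge ps (q :: qs) else q :: bMerge (p :: ps) qs

-- The level walk of Source B (state lo, dsf, the two accumulators). The while loop is ported with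
-- fuel 100: whenever the loop body runs at all, zf ≥ 1 and lo grows geometrically, so inside
-- Dom the loop runs far fewer than 100 times (proved below via mIdx_le).
def bLevels (nBk nFw zf : Int) : Nat → Int → Int → List (Int × Int) → List (Int × Int) →
    List (Int × Int) × List (Int × Int)
  | 0, _, _, neg, pos => (neg, pos)
  | fuel + 1, lo, dsf, neg, pos =>
    if lo < nBk ∨ lo < nFw then
      let hi := lo + zf * dsf
      let neg' := if lo < nBk then
          neg ++ (PySem.List.pyRange (-(min nBk hi)) (-lo) dsf).map (fun d => (dsf, d))
        else neg
      let pos' := if lo < nFw then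
          pos ++ (PySem.List.pyRange lo (min nFw hi) dsf).map (fun d => (dsf, d))
        else pos
      bLevels nBk nFw zf fuel hi (2 * dsf) neg' pos'
    else (neg, pos)

def dsfDeltas_alt (winSize : Int) (reqNDeltasBk : Int) (reqNDeltasFw : Int) (reqZoomFactor : Int) : List (Int × Int) :=
  let nDeltasBk := min reqNDeltasBk (PySem.Int.floordiv winSize 2)
  let nDeltasFw := min reqNDeltasFw (PySem.Int.floordiv winSize 2)
  let zoomFactor := if 1 < reqZoomFactor then reqZoomFactor else max nDeltasBk nDeltasFw
  let np := bLevels nDeltasBk nDeltasFw zoomFactor 100 0 1 [] []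
  bMerge np.1 np.2

-- ===== PRECONDITION & SPEC =====
-- Pre_ excludes exactly the inputs on which the Python A raises: winSize ≤ 0, reqNDeltasBk < 0,
-- reqNDeltasFw < 1 or reqZoomFactor < 0 fail A's argument asserts, and winSize = 1 makes the
-- delta list empty so A's `ret[0]` raises IndexError.
def Pre_dsfDeltas (winSize : Int) (reqNDeltasBk : Int) (reqNDeltasFw : Int) (reqZoomFactor : Int) : Prop :=
  2 ≤ winSize ∧ 0 ≤ reqNDeltasBk ∧ 1 ≤ reqNDeltasFw ∧ 0 ≤ reqZoomFactor
instance (winSize : Int) (reqNDeltasBk : Int) (reqNDeltasFw : Int) (reqZoomFactor : Int) : Decidable (Pre_dsfDeltas winSize reqNDeltasBk reqNDeltasFw reqZoomFactor) := by unfold Pre_dsfDeltas; infer_instance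
def pvWitness_dsfDeltas : Int × Int × Int × Int := (4, 2, 3, 0)

def Spec_dsfDeltas (winSize : Int) (reqNDeltasBk : Int) (reqNDeltasFw : Int) (reqZoomFactor : Int) (out : List (Int × Int)) : Prop := out = dsfDeltas_alt winSize reqNDeltasBk reqNDeltasFw reqZoomFactor
instance (winSize : Int) (reqNDeltasBk : Int) (reqNDeltasFw : Int) (reqZoomFactor : Int) (out : List (Int × Int)) : Decidable (Spec_dsfDeltas winSize reqNDeltasBk reqNDeltasFw reqZoomFactor out) := by unfold Spec_dsfDeltas; infer_instance

-- ===== CLAIM (what is proved, stated in full; the proofs are below) =====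
def Claim_equal_dsfDeltas : Prop := ∀ (winSize : Int) (reqNDeltasBk : Int) (reqNDeltasFw : Int) (reqZoomFactor : Int), Dom_dsfDeltas winSize reqNDeltasBk reqNDeltasFw reqZoomFactor → Pre_dsfDeltas winSize reqNDeltasBk reqNDeltasFw reqZoomFactor → Spec_dsfDeltas winSize reqNDeltasBk reqNDeltasFw reqZoomFactor (dsfDeltas winSize reqNDeltasBk reqNDeltasFw reqZoomFactor)

-- ===== LEMMAS AND PROOFS =====

-- The lexicographic order on (dsf, delta) pairs, as a Prop (Python's tuple `<`).
def RltP (p q : Int × Int) : Prop := p.1 < q.1 ∨ (p.1 = q.1 ∧ p.2 < q.2)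
-- "not strictly above": the order sorted2 and bMerge leave their output in.
def RleP (p q : Int × Int) : Prop := ¬ RltP q p

-- The running upper bound after k zoom levels: zf * (2^k - 1).
def Sz (zf : Int) (k : Nat) : Int := zf * (2 ^ k - 1)
-- Number of zoom levels whose lower bound is still below n (= length of A's filtered list).
def mIdx (zf n : Int) : Nat := ((List.range 66).filter (fun l => decide (Sz zf l < n))).length

-- The deltas emitted at zoom level k (dsf = 2^k), bk side resp. fw side.
def negSeg (n zf : Int) (k : Nat) : List (Int × Int) :=
  (PySem.List.pyRange (-(min n (Sz zf (k + 1)))) (-(Sz zf k)) (2 ^ k)).map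
    (fun d => ((2 ^ k : Int), d))
def posSeg (n zf : Int) (k : Nat) : List (Int × Int) :=
  (PySem.List.pyRange (Sz zf k) (min n (Sz zf (k + 1))) (2 ^ k)).map
    (fun d => ((2 ^ k : Int), d))

theorem Sz_mono {zf : Int} (hzf : 1 ≤ zf) {a b : Nat} (h : a < b) : Sz zf a < Sz zf b := by
  unfold Sz
  have h2 : (2:Int) ^ a < 2 ^ b := by
    exact_mod_cast Nat.pow_lt_pow_right (by norm_num) h
  nlinarith

theorem Sz_mono_le {zf : Int} (hzf : 1 ≤ zf) {a b : Nat} (h : a ≤ b) : Sz zf a ≤ Sz zf b := by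
  rcases Nat.eq_or_lt_of_le h with rfl | h
  · exact le_refl _
  · exact le_of_lt (Sz_mono hzf h)

theorem Sz_big {zf : Int} (hzf : 1 ≤ zf) {k : Nat} (hk : 33 ≤ k) : 2 ^ 30 < Sz zf k := by
  have h := Sz_mono_le hzf hk
  have h33 : (2:Int) ^ 30 < Sz zf 33 := by unfold Sz; nlinarith
  omega

theorem filter_range_dc (p : Nat → Bool) (N : Nat)
    (hdc : ∀ a b : Nat, a ≤ b → p b = true → p a = true) :
    (List.range N).filter p = List.range ((List.range N).filter p).length := by
  induction N with
  | zero => simp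
  | succ N ih =>
    rw [List.range_succ, List.filter_append]
    by_cases hN : p N = true
    · have hall : (List.range N).filter p = List.range N := by
        apply List.filter_eq_self.2
        intro a ha
        exact hdc a N (le_of_lt (List.mem_range.1 ha)) hN
      rw [hall]
      simp only [List.filter_cons, hN, List.filter_nil]
      rw [List.length_append, List.length_range]
      simp [List.range_succ]
    · rw [Bool.not_eq_true] at hN
      simp only [List.filter_cons, hN, Bool.false_eq_true, if_false, List.filter_nil,
        List.append_nil]
      exact ih

theorem mIdx_range {zf n : Int} (hzf : 1 ≤ zf) :
    (List.range 66).filter (fun l => decide (Sz zf l < n)) = List.range (mIdx zf n) := by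
  apply filter_range_dc
  intro a b hab hb
  simp only [decide_eq_true_eq] at *
  exact lt_of_le_of_lt (Sz_mono_le hzf hab) hb

theorem mIdx_le {zf n : Int} (hzf : 1 ≤ zf) (hn : n ≤ 2 ^ 30) : mIdx zf n ≤ 33 := by
  by_contra h
  rw [not_le] at h
  have h33 : (33 : Nat) ∈ List.range (mIdx zf n) := List.mem_range.2 h
  rw [← mIdx_range hzf] at h33
  have := List.of_mem_filter h33
  simp only [decide_eq_true_eq] at this
  have := Sz_big hzf (le_refl 33)
  omega

theorem mIdx_key {zf n : Int} (hzf : 1 ≤ zf) (hn : n ≤ 2 ^ 30) (k : Nat) :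
    Sz zf k < n ↔ k < mIdx zf n := by
  have hm := mIdx_le hzf hn
  by_cases hk : k < 66
  · constructor
    · intro h
      have : k ∈ (List.range 66).filter (fun l => decide (Sz zf l < n)) := by
        apply List.mem_filter.2
        exact ⟨List.mem_range.2 hk, by simpa using h⟩
      rw [mIdx_range hzf] at this
      exact List.mem_range.1 this
    · intro h
      have : k ∈ List.range (mIdx zf n) := List.mem_range.2 h
      rw [← mIdx_range hzf] at this
      have := List.of_mem_filter this
      simpa using this
  · constructor
    · intro h
      have := Sz_big hzf (show 33 ≤ k by omega)
      omega
    · intro h; omega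


theorem sum_pow_eq (zf : Int) (l : Nat) :
    ((PySem.List.pyRange 0 (l : Int) 1).map (fun f => zf * 2 ^ f.toNat)).sum = Sz zf l := by
  induction l with
  | zero => simp [Sz]
  | succ l ih =>
    have hc : ((l : Nat) : Int) + 1 = ((l + 1 : Nat) : Int) := by push_cast; ring
    rw [← hc, PySem.List.pyRange_one_succ_right (by positivity), List.map_append,
      List.sum_append, ih]
    simp only [List.map_cons, List.map_nil, List.sum_cons, List.sum_nil]
    unfold Sz
    rw [show ((l:Int)).toNat = l by omega]
    ring_nf

theorem aDHi_eq (zf : Int) : aDHi zf = (List.range 66).map (Sz zf) := by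
  unfold aDHi
  rw [show (66:Int) = ((66:Nat):Int) from rfl, PySem.List.pyRange_zero_nat, List.map_map]
  apply List.map_congr_left
  intro l _
  exact sum_pow_eq zf l

theorem dHi_get {zf n : Int} (hzf : 1 ≤ zf) (hn : n ≤ 2 ^ 30) {k : Nat} (hk : k ≤ mIdx zf n) :
    PySem.List.pyGetD ((List.range (mIdx zf n)).map (Sz zf) ++ [min n (Sz zf (mIdx zf n))])
      ((k : Nat) : Int) 0 = min n (Sz zf k) := by
  rw [PySem.List.pyGetD_of_nonneg _ _ (by positivity), Int.toNat_natCast]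
  rcases Nat.lt_or_ge k (mIdx zf n) with h | h
  · rw [List.getD_eq_getElem _ _ (by simp; omega), List.getElem_append_left (by simpa using h)]
    simp only [List.getElem_map, List.getElem_range]
    have : Sz zf k < n := (mIdx_key hzf hn k).2 h
    omega
  · have hkm : k = mIdx zf n := by omega
    subst hkm
    rw [List.getD_eq_getElem _ _ (by simp), List.getElem_append_right (by simp)]
    simp

theorem aSide_eq {zf n : Int} (hzf : 1 ≤ zf) (hn : n ≤ 2 ^ 30) (neg : Bool) :
    aSide zf n neg =
      ((List.range (mIdx zf n)).map (fun k => if neg then negSeg n zf k else posSeg n zf k)).flatten := by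
  have hm33 := mIdx_le hzf hn
  have hF : (aDHi zf).filter (fun hi => decide (hi < n)) = (List.range (mIdx zf n)).map (Sz zf) := by
    rw [aDHi_eq, List.filter_map]
    rw [show ((fun hi => decide (hi < n)) ∘ Sz zf) = (fun l => decide (Sz zf l < n)) from rfl]
    rw [mIdx_range hzf]
  have hGet : PySem.List.pyGetD (aDHi zf) ((mIdx zf n : Nat) : Int) 0 = Sz zf (mIdx zf n) := by
    rw [aDHi_eq, PySem.List.pyGetD_eq_getElem _ _ (by positivity) (by simp; omega)]
    simp
  unfold aSide
  dsimp only
  rw [hF]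
  simp only [List.length_map, List.length_range]
  rw [hGet]
  simp only [List.length_append, List.length_map, List.length_range, List.length_cons,
    List.length_nil, Nat.zero_add]
  -- dsf table
  have hdsf : (List.map (fun l2f => (2:Int) ^ (l2f - 1).toNat)
      (List.take (mIdx zf n + 1) (PySem.List.pyRange 0 66))) =
      (List.range (mIdx zf n + 1)).map (fun k => (2:Int) ^ (((k:Nat):Int) - 1).toNat) := by
    rw [show (66:Int) = ((66:Nat):Int) from rfl, PySem.List.pyRange_zero_nat, ← List.map_take,
      List.take_range, List.map_map]
    have : min (mIdx zf n + 1) 66 = mIdx zf n + 1 := by omega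
    rw [this]
    rfl
  rw [hdsf]
  -- the outer index range
  rw [show ((mIdx zf n + 1 : Nat) : Int) = (((mIdx zf n + 1 : Nat)) : Int) from rfl]
  rw [PySem.List.pyRange_one 1]
  have : ((((mIdx zf n + 1 : Nat)) : Int) - 1).toNat = mIdx zf n := by omega
  rw [this]
  rw [List.flatMap_def, List.map_map]
  congr 1
  apply List.map_congr_left
  intro k hk
  have hkm : k < mIdx zf n := List.mem_range.1 hk
  -- the three table reads at index 1 + k
  have hidx : (1 : Int) + (k : Nat) = (((k + 1 : Nat)) : Int) := by push_cast; ring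
  have hs : PySem.List.pyGetD
      ((List.range (mIdx zf n + 1)).map (fun j => (2:Int) ^ (((j:Nat):Int) - 1).toNat))
      (1 + (k : Nat)) 1 = (2 : Int) ^ k := by
    rw [hidx, PySem.List.pyGetD_of_nonneg _ _ (by positivity), Int.toNat_natCast,
      List.getD_eq_getElem _ _ (by simp; omega)]
    simp only [List.getElem_map, List.getElem_range]
    congr 1
    omega
  have hhi : PySem.List.pyGetD
      ((List.range (mIdx zf n)).map (Sz zf) ++ [min n (Sz zf (mIdx zf n))])
      (1 + (k : Nat)) 0 = min n (Sz zf (k + 1)) := by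
    rw [hidx]
    exact dHi_get hzf hn (by omega)
  have hlo : PySem.List.pyGetD
      ((PySem.List.pyRange 0 ((mIdx zf n + 1 : Nat) : Int)).map
        (fun i => PySem.List.pyGetD
          ((List.range (mIdx zf n)).map (Sz zf) ++ [min n (Sz zf (mIdx zf n))]) (i - 1) 0))
      (1 + (k : Nat)) 0 = Sz zf k := by
    rw [hidx, PySem.List.pyGetD_map_pyRange _ _ _ _ (by omega)]
    have : (((k + 1 : Nat)) : Int) - 1 = ((k : Nat) : Int) := by push_cast; ring
    rw [this, dHi_get hzf hn (by omega)]
    have : Sz zf k < n := (mIdx_key hzf hn k).2 hkm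
    omega
  simp only [Function.comp_apply]
  rw [hs, hhi, hlo]
  cases neg
  · simp only [Bool.false_eq_true, if_false]
    rfl
  · simp only [if_true]
    rfl

theorem bLevels_eq {nBk nFw zf : Int} (hzf : 1 ≤ zf)
    (hBk : nBk ≤ 2 ^ 30) (hFw : nFw ≤ 2 ^ 30) :
    ∀ (fuel k : Nat), mIdx zf nBk ≤ k + fuel → mIdx zf nFw ≤ k + fuel →
    ∀ (accN accP : List (Int × Int)),
      bLevels nBk nFw zf fuel (Sz zf k) (2 ^ k) accN accP =
        (accN ++ ((List.range' k (mIdx zf nBk - k)).map (negSeg nBk zf)).flatten,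
         accP ++ ((List.range' k (mIdx zf nFw - k)).map (posSeg nFw zf)).flatten) := by
  intro fuel
  induction fuel with
  | zero =>
    intro k hB hF accN accP
    have h1 : mIdx zf nBk - k = 0 := by omega
    have h2 : mIdx zf nFw - k = 0 := by omega
    simp [bLevels, h1, h2]
  | succ fuel ih =>
    intro k hB hF accN accP
    simp only [bLevels]
    have hSucc : Sz zf k + zf * 2 ^ k = Sz zf (k + 1) := by
      unfold Sz; ring_nf
    have hPow : 2 * (2:Int) ^ k = 2 ^ (k + 1) := by rw [pow_succ]; ring
    by_cases hc : Sz zf k < nBk ∨ Sz zf k < nFw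
    · rw [if_pos hc]
      rw [hSucc, hPow, ih (k+1) (by omega) (by omega)]
      have hNeg : (if Sz zf k < nBk then
            accN ++ (PySem.List.pyRange (-(min nBk (Sz zf (k+1)))) (-(Sz zf k)) (2^k)).map
              (fun d => ((2^k : Int), d))
          else accN) ++ ((List.range' (k+1) (mIdx zf nBk - (k+1))).map (negSeg nBk zf)).flatten =
          accN ++ ((List.range' k (mIdx zf nBk - k)).map (negSeg nBk zf)).flatten := by
        by_cases hb : Sz zf k < nBk
        · rw [if_pos hb]
          have hkm : k < mIdx zf nBk := (mIdx_key hzf hBk k).1 hb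
          have : mIdx zf nBk - k = (mIdx zf nBk - (k+1)) + 1 := by omega
          rw [this, List.range'_succ, List.map_cons, List.flatten_cons, List.append_assoc]
          rfl
        · rw [if_neg hb]
          have hkm : ¬ k < mIdx zf nBk := fun h => hb ((mIdx_key hzf hBk k).2 h)
          have h1 : mIdx zf nBk - k = 0 := by omega
          have h2 : mIdx zf nBk - (k+1) = 0 := by omega
          rw [h1, h2]
          simp
      have hPos : (if Sz zf k < nFw then
            accP ++ (PySem.List.pyRange (Sz zf k) (min nFw (Sz zf (k+1))) (2^k)).map
              (fun d => ((2^k : Int), d))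
          else accP) ++ ((List.range' (k+1) (mIdx zf nFw - (k+1))).map (posSeg nFw zf)).flatten =
          accP ++ ((List.range' k (mIdx zf nFw - k)).map (posSeg nFw zf)).flatten := by
        by_cases hb : Sz zf k < nFw
        · rw [if_pos hb]
          have hkm : k < mIdx zf nFw := (mIdx_key hzf hFw k).1 hb
          have : mIdx zf nFw - k = (mIdx zf nFw - (k+1)) + 1 := by omega
          rw [this, List.range'_succ, List.map_cons, List.flatten_cons, List.append_assoc]
          rfl
        · rw [if_neg hb]
          have hkm : ¬ k < mIdx zf nFw := fun h => hb ((mIdx_key hzf hFw k).2 h)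
          have h1 : mIdx zf nFw - k = 0 := by omega
          have h2 : mIdx zf nFw - (k+1) = 0 := by omega
          rw [h1, h2]
          simp
      rw [Prod.mk.injEq]
      exact ⟨hNeg, hPos⟩
    · rw [if_neg hc]
      rw [not_or] at hc
      have h1 : mIdx zf nBk - k = 0 := by
        have : ¬ k < mIdx zf nBk := fun h => absurd ((mIdx_key hzf hBk k).2 h) (by omega)
        omega
      have h2 : mIdx zf nFw - k = 0 := by
        have : ¬ k < mIdx zf nFw := fun h => absurd ((mIdx_key hzf hFw k).2 h) (by omega)
        omega
      simp [h1, h2]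


theorem RltP_trans {p q r : Int × Int} (h1 : RltP p q) (h2 : RltP q r) : RltP p r := by
  unfold RltP at *; omega

theorem RltP_asymm {p q : Int × Int} (h : RltP p q) : ¬ RltP q p := by
  unfold RltP at *; omega

theorem RleP_antisymm {p q : Int × Int} (h1 : RleP p q) (h2 : RleP q p) : p = q := by
  unfold RleP RltP at *
  have h3 : p.1 = q.1 ∧ p.2 = q.2 := by omega
  exact Prod.ext h3.1 h3.2

theorem lexLtB_iff {p q : Int × Int} : lexLtB p q = true ↔ RltP p q := by
  simp [lexLtB, RltP]

theorem sorted2_blt_iff {p q : Int × Int} :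
    (decide (p.1 < q.1) || (!decide (q.1 < p.1) && decide (p.2 < q.2))) = true ↔ RltP p q := by
  simp [RltP]
  omega

theorem insertBy_pairwise_le (blt : (Int × Int) → (Int × Int) → Bool)
    (hblt : ∀ p q, blt p q = true ↔ RltP p q) :
    ∀ (x : Int × Int) (acc : List (Int × Int)), acc.Pairwise RleP →
      (PySem.List.insertBy blt x acc).Pairwise RleP := by
  intro x acc
  induction acc with
  | nil => intro _; simp [PySem.List.insertBy]
  | cons y ys ih =>
    intro hp
    rw [List.pairwise_cons] at hp
    simp only [PySem.List.insertBy]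
    by_cases hb : blt x y = true
    · rw [if_pos hb]
      have hxy : RltP x y := (hblt _ _).1 hb
      refine List.Pairwise.cons ?_ (List.Pairwise.cons hp.1 hp.2)
      intro z hz
      rcases List.mem_cons.1 hz with rfl | hz
      · exact RltP_asymm hxy
      · intro hzx
        exact hp.1 z hz (RltP_trans hzx hxy)
    · rw [if_neg hb]
      refine List.Pairwise.cons ?_ (ih hp.2)
      intro z hz
      rcases (PySem.List.mem_insertBy _ _ _ _).1 hz with rfl | hz
      · intro hzy
        exact hb ((hblt _ _).2 hzy)
      · exact hp.1 z hz

theorem sorted2_pairwise_le (xs : List (Int × Int)) :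
    (PySem.List.sorted2 xs (fun p => p.1) (fun p => p.2)).Pairwise RleP := by
  unfold PySem.List.sorted2
  dsimp only
  rw [if_neg (by simp : ¬ (false = true))]
  have : ∀ (l : List (Int × Int)) (acc : List (Int × Int)), acc.Pairwise RleP →
      (l.foldl (fun acc x => PySem.List.insertBy
        (fun a b => decide (a.1 < b.1) || (!decide (b.1 < a.1) && decide (a.2 < b.2))) x acc)
        acc).Pairwise RleP := by
    intro l
    induction l with
    | nil => intro acc h; exact h
    | cons x xs ih =>
      intro acc h
      exact ih _ (insertBy_pairwise_le _ (fun p q => sorted2_blt_iff) x acc h)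
  exact this xs [] (by simp)

theorem bMerge_perm : ∀ (l1 l2 : List (Int × Int)), (bMerge l1 l2).Perm (l1 ++ l2) := by
  intro l1
  induction l1 with
  | nil => intro l2; simp [bMerge]
  | cons p ps ih1 =>
    intro l2
    induction l2 with
    | nil => simp [bMerge]
    | cons q qs ih2 =>
      simp only [bMerge]
      by_cases hb : lexLtB p q = true
      · rw [if_pos hb]
        exact (ih1 (q :: qs)).cons p
      · rw [if_neg hb]
        refine (ih2.cons q).trans ?_
        exact List.perm_middle.symm

theorem bMerge_mem {z : Int × Int} {l1 l2 : List (Int × Int)} (h : z ∈ bMerge l1 l2) :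
    z ∈ l1 ∨ z ∈ l2 := by
  have := (bMerge_perm l1 l2).mem_iff.1 h
  simpa using this

theorem bMerge_pairwise : ∀ (l1 l2 : List (Int × Int)),
    l1.Pairwise RltP → l2.Pairwise RltP → (bMerge l1 l2).Pairwise RleP := by
  intro l1
  induction l1 with
  | nil =>
    intro l2 _ h2
    simpa [bMerge] using h2.imp (fun h => RltP_asymm h)
  | cons p ps ih1 =>
    intro l2
    induction l2 with
    | nil =>
      intro h1 _
      simpa [bMerge] using h1.imp (fun h => RltP_asymm h)
    | cons q qs ih2 =>
      intro h1 h2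
      rw [List.pairwise_cons] at h1 h2
      simp only [bMerge]
      by_cases hb : lexLtB p q = true
      · rw [if_pos hb]
        have hpq : RltP p q := lexLtB_iff.1 hb
        refine List.Pairwise.cons ?_ (ih1 (q :: qs) h1.2 (List.Pairwise.cons h2.1 h2.2))
        intro z hz
        rcases bMerge_mem hz with hz | hz
        · exact RltP_asymm (h1.1 z hz)
        · rcases List.mem_cons.1 hz with rfl | hz
          · exact RltP_asymm hpq
          · exact RltP_asymm (RltP_trans hpq (h2.1 z hz))
      · rw [if_neg hb]
        have hnpq : ¬ RltP p q := fun h => hb (lexLtB_iff.2 h)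
        refine List.Pairwise.cons ?_ (ih2 (List.Pairwise.cons h1.1 h1.2) h2.2)
        intro z hz
        rcases bMerge_mem hz with hz | hz
        · rcases List.mem_cons.1 hz with rfl | hz
          · exact hnpq
          · intro hzq
            exact hnpq (RltP_trans (h1.1 z hz) hzq)
        · exact RltP_asymm (h2.1 z hz)

theorem sorted2_eq_merge (l1 l2 : List (Int × Int))
    (h1 : l1.Pairwise RltP) (h2 : l2.Pairwise RltP) :
    PySem.List.sorted2 (l1 ++ l2) (fun p => p.1) (fun p => p.2) = bMerge l1 l2 := by
  apply List.Perm.eq_of_pairwise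
    (fun a b _ _ hab hba => RleP_antisymm hab hba)
    (sorted2_pairwise_le (l1 ++ l2))
    (bMerge_pairwise l1 l2 h1 h2)
  exact (PySem.List.sorted2_perm _ _ _ _).trans (bMerge_perm l1 l2).symm

theorem pyRange_pairwise_lt {a b s : Int} (hs : 0 < s) :
    (PySem.List.pyRange a b s).Pairwise (· < ·) := by
  rw [PySem.List.pyRange_of_pos _ _ hs]
  refine List.Pairwise.map _ ?_ (List.pairwise_lt_range)
  intro i j hij
  have : (i : Int) < (j : Int) := by exact_mod_cast hij
  nlinarith

theorem negSeg_pairwise (n zf : Int) (k : Nat) : (negSeg n zf k).Pairwise RltP := by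
  unfold negSeg
  refine List.Pairwise.map _ ?_ (pyRange_pairwise_lt (by positivity))
  intro d d' h
  exact Or.inr ⟨rfl, h⟩

theorem posSeg_pairwise (n zf : Int) (k : Nat) : (posSeg n zf k).Pairwise RltP := by
  unfold posSeg
  refine List.Pairwise.map _ ?_ (pyRange_pairwise_lt (by positivity))
  intro d d' h
  exact Or.inr ⟨rfl, h⟩

theorem seg_fst {n zf : Int} {k : Nat} {p : Int × Int}
    (h : p ∈ negSeg n zf k ∨ p ∈ posSeg n zf k) : p.1 = 2 ^ k := by
  rcases h with h | h <;>
  · rcases List.mem_map.1 h with ⟨d, _, rfl⟩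
    rfl

theorem flatten_seg_pairwise {n zf : Int} (m : Nat)
    (seg : Nat → List (Int × Int))
    (hseg : ∀ k, seg k = negSeg n zf k ∨ seg k = posSeg n zf k) :
    (((List.range m).map seg).flatten).Pairwise RltP := by
  rw [List.pairwise_flatten]
  constructor
  · intro l hl
    rcases List.mem_map.1 hl with ⟨k, _, rfl⟩
    rcases hseg k with h | h <;> rw [h]
    · exact negSeg_pairwise n zf k
    · exact posSeg_pairwise n zf k
  · refine List.Pairwise.map _ ?_ (List.pairwise_lt_range)
    intro i j hij x hx y hy
    have hxi : x.1 = 2 ^ i := by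
      rcases hseg i with h | h <;> rw [h] at hx
      · exact seg_fst (Or.inl hx)
      · exact seg_fst (Or.inr hx)
    have hyj : y.1 = 2 ^ j := by
      rcases hseg j with h | h <;> rw [h] at hy
      · exact seg_fst (Or.inl hy)
      · exact seg_fst (Or.inr hy)
    left
    rw [hxi, hyj]
    exact_mod_cast Nat.pow_lt_pow_right (by norm_num) hij


-- ===== VERDICT (by name: the statement is the Claim_ definition above) =====
theorem dsfDeltas_spec : Claim_equal_dsfDeltas := by
  intro w bk fw rz hDom hPre
  obtain ⟨hw, hbk, hfw, hrz⟩ := hPre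
  unfold Dom_dsfDeltas at hDom
  simp only [pvDomInt, Bool.and_eq_true, decide_eq_true_eq] at hDom
  obtain ⟨⟨⟨hwD, hbkD⟩, hfwD⟩, hrzD⟩ := hDom
  unfold Spec_dsfDeltas dsfDeltas dsfDeltas_alt
  dsimp only
  have hhalf_eq : PySem.Int.floordiv w 2 = w / 2 := PySem.Int.floordiv_eq_ediv_of_pos (by norm_num)
  have hhalf1 : 1 ≤ PySem.Int.floordiv w 2 := by rw [hhalf_eq]; omega
  have hhalfB : PySem.Int.floordiv w 2 ≤ 2 ^ 30 := by rw [hhalf_eq]; norm_num; omega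
  have hnBkB : min bk (PySem.Int.floordiv w 2) ≤ 2 ^ 30 := le_trans (min_le_right _ _) hhalfB
  have hnFwB : min fw (PySem.Int.floordiv w 2) ≤ 2 ^ 30 := le_trans (min_le_right _ _) hhalfB
  have hnFw1 : 1 ≤ min fw (PySem.Int.floordiv w 2) := le_min hfw hhalf1
  have hzf : 1 ≤ (if 1 < rz then rz
      else max (min bk (PySem.Int.floordiv w 2)) (min fw (PySem.Int.floordiv w 2))) := by
    split
    · omega
    · exact le_trans hnFw1 (le_max_right _ _)
  rw [aSide_eq hzf hnBkB true, aSide_eq hzf hnFwB false]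
  have hb := bLevels_eq hzf hnBkB hnFwB 100 0
    (by have := mIdx_le hzf hnBkB; omega) (by have := mIdx_le hzf hnFwB; omega) [] []
  rw [show Sz (if 1 < rz then rz
      else max (min bk (PySem.Int.floordiv w 2)) (min fw (PySem.Int.floordiv w 2))) 0 = 0 by
    simp [Sz]] at hb
  rw [show ((2:Int) ^ (0:Nat)) = 1 by norm_num] at hb
  rw [hb]
  simp only [Nat.sub_zero, List.nil_append]
  rw [← List.range_eq_range', ← List.range_eq_range']
  simp only [if_true, Bool.false_eq_true, if_false]
  exact sorted2_eq_merge _ _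
    (flatten_seg_pairwise _ _ (fun k => Or.inl rfl))
    (flatten_seg_pairwise _ _ (fun k => Or.inr rfl))
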